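-- pv_equiv track=rewrite | github.com/mylife126/Numpy-Machine-LearningAlgorithm-Implementations | high_frequent_questions/min_manhattan_dist_in_array.py | min_manhattan_distance
-- ===== SOURCE A (Python) =====
-- def manhattan_distance(a, b):
--     return abs(a - b)
--
-- def min_manhattan_distance(nums):
--     dist = []
--     for i in range(len(nums)):
--         pivot = nums[i]
--         its_min = float("inf")
--         for j in range(len(nums)):
--             if j != i:
--                 its_dist = manhattan_distance(pivot, nums[j])
--                 if its_dist < its_min:
--                     its_min = its_dist
--
--         dist.append(its_min)
--
--     return dist
-- ===== SOURCE B (Python) =====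
-- def min_manhattan_distance(nums):
--     n = len(nums)
--     order = sorted(range(n), key=lambda i: nums[i])
--     res = [float("inf")] * n
--     for k in range(n):
--         i = order[k]
--         best = float("inf")
--         if k > 0:
--             best = nums[i] - nums[order[k - 1]]
--         if k + 1 < n:
--             right = nums[order[k + 1]] - nums[i]
--             if right < best:
--                 best = right
--         res[i] = best
--     return res
-- ===== Notes on version B (the rewrite author's own statement) =====
-- stated objective: faster
-- what changed: Replaces the O(n^2) all-pairs nearest-distance scan by sorting index order once and taking, for each element, the smaller of its two adjacent gaps in sorted order.
-- outside the precondition, e.g. on min_manhattan_distance([5]): A returns [inf], B returns [inf]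
import Mathlib
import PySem

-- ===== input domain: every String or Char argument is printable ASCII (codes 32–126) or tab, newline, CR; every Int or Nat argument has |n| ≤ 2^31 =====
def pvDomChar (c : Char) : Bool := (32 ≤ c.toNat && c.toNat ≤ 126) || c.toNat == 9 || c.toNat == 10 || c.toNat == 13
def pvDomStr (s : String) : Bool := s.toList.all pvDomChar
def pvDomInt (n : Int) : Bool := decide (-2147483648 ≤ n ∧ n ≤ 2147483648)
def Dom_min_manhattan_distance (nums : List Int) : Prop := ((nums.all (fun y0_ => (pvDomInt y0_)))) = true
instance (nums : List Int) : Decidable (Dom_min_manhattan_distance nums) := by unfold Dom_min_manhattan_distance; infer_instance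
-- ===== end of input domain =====

-- B replaces A's O(n^2) all-pairs nearest-distance scan by one sort of the index order and per-element adjacent-gap minima.


-- ===== PORT A =====
-- its_min is float("inf") until the first comparison: modelled as `Option Int` with `none` = inf
-- (under Pre_ every appended value is `some`, so the final `.getD 0` fallback is never taken).
-- A-side helper
def pvOminStep (m : Option Int) (d : Int) : Option Int :=
  match m with
  | none => some d
  | some v => if d < v then some d else some v

def min_manhattan_distance (nums : List Int) : List Int :=
  (List.range nums.length).foldl (fun dist i =>
    let pivot := nums.getD i 0
    let itsMin := (List.range nums.length).foldl (fun m j =>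
      if j ≠ i then pvOminStep m (|pivot - nums.getD j 0|) else m) none
    dist ++ [itsMin.getD 0]) []

-- ===== PORT B =====
-- float("inf") cells of `res` are `none`; sorted(range(n), key=...) is PySem.List.sorted.
def min_manhattan_distance_alt (nums : List Int) : List Int :=
  let n := nums.length
  let order := PySem.List.sorted (List.range n) (fun i => nums.getD i 0)
  let res := (List.range n).foldl (fun res k =>
    let i := order.getD k 0
    let best1 : Option Int :=
      if 0 < k then some (nums.getD i 0 - nums.getD (order.getD (k - 1) 0) 0) else none
    let best : Option Int :=
      if k + 1 < n then
        let right := nums.getD (order.getD (k + 1) 0) 0 - nums.getD i 0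
        match best1 with
        | none => some right
        | some b => if right < b then some right else some b
      else best1
    res.set i best) (List.replicate n (none : Option Int))
  res.map (fun o => o.getD 0)

-- ===== PRECONDITION & SPEC =====
-- Pre_ excludes exactly the singleton list: there A returns [float("inf")], a float that is not a
-- value of the declared return type List Int (B's Python returns the same [inf] there).
def Pre_min_manhattan_distance (nums : List Int) : Prop := nums.length ≠ 1
instance (nums : List Int) : Decidable (Pre_min_manhattan_distance nums) := by
  unfold Pre_min_manhattan_distance; infer_instance
def pvWitness_min_manhattan_distance : List Int := [3, 1, 10, 2]

def Spec_min_manhattan_distance (nums : List Int) (out : List Int) : Prop := out = min_manhattan_distance_alt nums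
instance (nums : List Int) (out : List Int) : Decidable (Spec_min_manhattan_distance nums out) := by unfold Spec_min_manhattan_distance; infer_instance

-- ===== CLAIM (what is proved, stated in full; the proofs are below) =====
def Claim_equal_min_manhattan_distance : Prop := ∀ (nums : List Int), Dom_min_manhattan_distance nums → Pre_min_manhattan_distance nums → Spec_min_manhattan_distance nums (min_manhattan_distance nums)

-- ===== LEMMAS AND PROOFS =====
-- proof helpers
def pvCands (nums : List Int) (i : Nat) : List Int :=
  ((List.range nums.length).filter (fun j => !decide (j = i))).map
    (fun j => |nums.getD i 0 - nums.getD j 0|)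

def pvOrd (nums : List Int) : List Nat :=
  PySem.List.sorted (List.range nums.length) (fun i => nums.getD i 0)

def pvBest (nums : List Int) (order : List Nat) (k : Nat) : Option Int :=
  let i := order.getD k 0
  let best1 : Option Int :=
    if 0 < k then some (nums.getD i 0 - nums.getD (order.getD (k - 1) 0) 0) else none
  if k + 1 < nums.length then
    let right := nums.getD (order.getD (k + 1) 0) 0 - nums.getD i 0
    match best1 with
    | none => some right
    | some b => if right < b then some right else some b
  else best1

def pvStep (nums : List Int) (order : List Nat) (res : List (Option Int)) (k : Nat) :
    List (Option Int) :=
  res.set (order.getD k 0) (pvBest nums order k)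

lemma alt_unfold (nums : List Int) :
    min_manhattan_distance_alt nums =
      (((List.range nums.length).foldl (pvStep nums (pvOrd nums))
        (List.replicate nums.length (none : Option Int))).map (fun o => o.getD 0)) := rfl

lemma ominStep_some (a d : Int) : pvOminStep (some a) d = some (min a d) := by
  simp only [pvOminStep, min_def]
  split_ifs <;> simp_all
  omega

lemma foldl_omin_some (l : List Int) (a : Int) :
    l.foldl pvOminStep (some a) = some (l.foldl min a) := by
  induction l generalizing a with
  | nil => rfl
  | cons x t ih => simp [List.foldl, ominStep_some, ih]

lemma foldl_omin_none (l : List Int) : l.foldl pvOminStep none = l.min? := by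
  cases l with
  | nil => rfl
  | cons x t =>
      rw [List.min?_cons']
      simp [List.foldl, pvOminStep, foldl_omin_some]

lemma foldl_guard_filter (f : Nat → Int) (i : Nat) (l : List Nat) (m : Option Int) :
    l.foldl (fun m j => if j = i then m else pvOminStep m (f j)) m
      = ((l.filter (fun j => !decide (j = i))).map f).foldl pvOminStep m := by
  induction l generalizing m with
  | nil => rfl
  | cons x t ih =>
      by_cases h : x = i <;> simp [List.foldl_cons, h, ih]

lemma a_char (nums : List Int) :
    min_manhattan_distance nums =
      (List.range nums.length).map (fun i => ((pvCands nums i).min?).getD 0) := by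
  unfold min_manhattan_distance
  simp only [ne_eq, ite_not]
  rw [PySem.List.foldl_append_singleton_eq_map
    (fun i => (((List.range nums.length).foldl (fun m j =>
      if j = i then m else pvOminStep m (|nums.getD i 0 - nums.getD j 0|)) none).getD 0))]
  simp only [List.nil_append]
  refine List.map_congr_left (fun i _ => ?_)
  rw [foldl_guard_filter, foldl_omin_none]
  rfl

lemma foldl_step_length (nums : List Int) (ord : List Nat) (ks : List Nat)
    (res : List (Option Int)) :
    (ks.foldl (pvStep nums ord) res).length = res.length := by
  induction ks generalizing res with
  | nil => rfl
  | cons x t ih => simp [List.foldl_cons, pvStep, ih]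

lemma fold_range_get (nums : List Int) (ord : List Nat)
    (hnod : ord.Nodup)
    (K k : Nat) (hk : k < K) (hK : K ≤ ord.length)
    (res : List (Option Int)) (hres : ∀ j ∈ ord, j < res.length) :
    ((List.range K).foldl (pvStep nums ord) res)[ord.getD k 0]? = some (pvBest nums ord k) := by
  induction K with
  | zero => omega
  | succ K ih =>
      rw [List.range_succ, List.foldl_append, List.foldl_cons, List.foldl_nil]
      by_cases hkK : k = K
      · subst hkK
        have hmem : ord.getD k 0 ∈ ord := by
          rw [List.getD_eq_getElem _ _ (show k < ord.length by omega)]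
          exact List.getElem_mem _
        have hlt : ord.getD k 0 < ((List.range k).foldl (pvStep nums ord) res).length := by
          rw [foldl_step_length]; exact hres _ hmem
        exact List.getElem?_set_self hlt
      · have hklt : k < ord.length := by omega
        have hKlt : K < ord.length := by omega
        have hne : ord.getD K 0 ≠ ord.getD k 0 := by
          rw [List.getD_eq_getElem _ _ hKlt, List.getD_eq_getElem _ _ hklt]
          intro h
          exact hkK ((hnod.getElem_inj_iff.mp h).symm)
        rw [show pvStep nums ord ((List.range K).foldl (pvStep nums ord) res) K
              = ((List.range K).foldl (pvStep nums ord) res).set (ord.getD K 0)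
                  (pvBest nums ord K) from rfl,
            List.getElem?_set_ne hne]
        exact ih (by omega) (by omega)

lemma ord_length (nums : List Int) : (pvOrd nums).length = nums.length := by
  unfold pvOrd
  rw [PySem.List.length_sorted]
  exact List.length_range

lemma ord_nodup (nums : List Int) : (pvOrd nums).Nodup :=
  ((PySem.List.sorted_perm (List.range nums.length) (fun i => nums.getD i 0) false).nodup_iff).mpr
    (List.nodup_range)

lemma ord_val_lt (nums : List Int) {m : Nat} (hm : m < (pvOrd nums).length) :
    (pvOrd nums)[m] < nums.length := by
  have h1 : (pvOrd nums)[m] ∈ pvOrd nums := List.getElem_mem _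
  have h2 := (PySem.List.sorted_perm (List.range nums.length)
    (fun i => nums.getD i 0) false).mem_iff.mp h1
  simpa using h2

lemma ord_mono (nums : List Int) {p q : Nat} (hpq : p ≤ q) (hq : q < (pvOrd nums).length) :
    nums.getD (pvOrd nums)[p] 0 ≤ nums.getD (pvOrd nums)[q] 0 :=
  PySem.List.key_sorted_getElem_mono (List.range nums.length) (fun i => nums.getD i 0) hpq hq

lemma mem_cands (nums : List Int) {i j : Nat} (hj : j < nums.length) (hne : j ≠ i) :
    |nums.getD i 0 - nums.getD j 0| ∈ pvCands nums i := by
  simp only [pvCands, List.mem_map, List.mem_filter, List.mem_range]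
  exact ⟨j, ⟨hj, by simp [hne]⟩, rfl⟩

lemma cands_lower (nums : List Int) (k : Nat) (hk : k < (pvOrd nums).length) (b : Int)
    (hL : 0 < k → b ≤ nums.getD ((pvOrd nums).getD k 0) 0 - nums.getD ((pvOrd nums).getD (k-1) 0) 0)
    (hR : k + 1 < nums.length → b ≤ nums.getD ((pvOrd nums).getD (k+1) 0) 0 - nums.getD ((pvOrd nums).getD k 0) 0) :
    ∀ c ∈ pvCands nums ((pvOrd nums).getD k 0), b ≤ c := by
  intro c hc
  simp only [pvCands, List.mem_map, List.mem_filter, List.mem_range] at hc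
  obtain ⟨j, ⟨hj, hne⟩, rfl⟩ := hc
  have hne' : j ≠ (pvOrd nums).getD k 0 := by simpa using hne
  have hjord : j ∈ pvOrd nums := by
    exact (PySem.List.sorted_perm (List.range nums.length)
      (fun i => nums.getD i 0) false).mem_iff.mpr (by simpa using hj)
  obtain ⟨k', hk'len, hj'⟩ := List.mem_iff_getElem.mp hjord
  have hgk : (pvOrd nums).getD k 0 = (pvOrd nums)[k] := List.getD_eq_getElem _ _ hk
  have hkk' : k' ≠ k := by
    intro h; subst h; exact hne' (by rw [hgk, hj'])
  rcases Nat.lt_or_ge k' k with hlt | hge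
  · -- j is left of k in sorted order
    have h0 : 0 < k := by omega
    have hg1 : (pvOrd nums).getD (k-1) 0 = (pvOrd nums)[k-1] :=
      List.getD_eq_getElem _ _ (by omega)
    have m1 : nums.getD j 0 ≤ nums.getD (pvOrd nums)[k-1] 0 := by
      rw [← hj']; exact ord_mono nums (by omega) (by omega)
    have m2 : nums.getD j 0 ≤ nums.getD (pvOrd nums)[k] 0 := by
      rw [← hj']; exact ord_mono nums (by omega) hk
    have hb := hL h0
    rw [hgk, hg1] at hb
    rw [hgk, abs_of_nonneg (by omega)]
    omega
  · -- j is right of k in sorted order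
    have h1 : k + 1 < nums.length := by
      have := ord_length nums; omega
    have hg1 : (pvOrd nums).getD (k+1) 0 = (pvOrd nums)[k+1] :=
      List.getD_eq_getElem _ _ (by rw [ord_length]; omega)
    have m1 : nums.getD (pvOrd nums)[k+1] 0 ≤ nums.getD j 0 := by
      rw [← hj']; exact ord_mono nums (by omega) hk'len
    have m2 : nums.getD (pvOrd nums)[k] 0 ≤ nums.getD j 0 := by
      rw [← hj']; exact ord_mono nums (by omega) hk'len
    have hb := hR h1
    rw [hgk, hg1] at hb
    rw [hgk, abs_of_nonpos (by omega)]
    omega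

lemma pvBest_eq (nums : List Int) (h2 : 2 ≤ nums.length) (k : Nat) (hk : k < nums.length) :
    pvBest nums (pvOrd nums) k = (pvCands nums ((pvOrd nums).getD k 0)).min? := by
  have hkord : k < (pvOrd nums).length := by rw [ord_length]; omega
  have hgk : (pvOrd nums).getD k 0 = (pvOrd nums)[k] := List.getD_eq_getElem _ _ hkord
  have hlen := ord_length nums
  by_cases h0 : 0 < k <;> by_cases h1 : k + 1 < nums.length
  · -- middle: both neighbours exist
    have hg1 : (pvOrd nums).getD (k-1) 0 = (pvOrd nums)[k-1] :=
      List.getD_eq_getElem _ _ (by omega)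
    have hg2 : (pvOrd nums).getD (k+1) 0 = (pvOrd nums)[k+1] :=
      List.getD_eq_getElem _ _ (by rw [ord_length]; omega)
    simp only [pvBest, if_pos h0, if_pos h1]
    set L := nums.getD ((pvOrd nums).getD k 0) 0 - nums.getD ((pvOrd nums).getD (k-1) 0) 0 with hLdef
    set R := nums.getD ((pvOrd nums).getD (k+1) 0) 0 - nums.getD ((pvOrd nums).getD k 0) 0 with hRdef
    have hLnn : nums.getD (pvOrd nums)[k-1] 0 ≤ nums.getD (pvOrd nums)[k] 0 :=
      ord_mono nums (by omega) hkord
    have hRnn : nums.getD (pvOrd nums)[k] 0 ≤ nums.getD (pvOrd nums)[k+1] 0 :=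
      ord_mono nums (by omega) (by rw [ord_length]; omega)
    have hLmem : L ∈ pvCands nums ((pvOrd nums).getD k 0) := by
      have hne : (pvOrd nums)[k-1] ≠ (pvOrd nums)[k] := by
        intro h; have := (ord_nodup nums).getElem_inj_iff.mp h; omega
      have := mem_cands nums (i := (pvOrd nums).getD k 0)
        (j := (pvOrd nums)[k-1]) (ord_val_lt nums (by omega)) (by rw [hgk]; exact hne)
      rw [show |nums.getD ((pvOrd nums).getD k 0) 0 - nums.getD (pvOrd nums)[k-1] 0| = L by
        rw [hLdef, hgk, hg1, abs_of_nonneg (by omega)]] at this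
      exact this
    have hRmem : R ∈ pvCands nums ((pvOrd nums).getD k 0) := by
      have hne : (pvOrd nums)[k+1] ≠ (pvOrd nums)[k] := by
        intro h; have := (ord_nodup nums).getElem_inj_iff.mp h; omega
      have := mem_cands nums (i := (pvOrd nums).getD k 0)
        (j := (pvOrd nums)[k+1]) (ord_val_lt nums (by rw [ord_length]; omega)) (by rw [hgk]; exact hne)
      rw [show |nums.getD ((pvOrd nums).getD k 0) 0 - nums.getD (pvOrd nums)[k+1] 0| = R by
        rw [hRdef, hgk, hg2, abs_of_nonpos (by omega)]; ring] at this
      exact this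
    symm
    rw [← apply_ite some, List.min?_eq_some_iff]
    constructor
    · split_ifs with h <;> [exact hRmem; exact hLmem]
    · refine cands_lower nums k hkord _ (fun _ => ?_) (fun _ => ?_)
      · split_ifs with h <;> omega
      · split_ifs with h <;> omega
  · -- k = last index, only left neighbour
    have hg1 : (pvOrd nums).getD (k-1) 0 = (pvOrd nums)[k-1] :=
      List.getD_eq_getElem _ _ (by omega)
    simp only [pvBest, if_pos h0, if_neg h1]
    set L := nums.getD ((pvOrd nums).getD k 0) 0 - nums.getD ((pvOrd nums).getD (k-1) 0) 0 with hLdef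
    have hLnn : nums.getD (pvOrd nums)[k-1] 0 ≤ nums.getD (pvOrd nums)[k] 0 :=
      ord_mono nums (by omega) hkord
    have hLmem : L ∈ pvCands nums ((pvOrd nums).getD k 0) := by
      have hne : (pvOrd nums)[k-1] ≠ (pvOrd nums)[k] := by
        intro h; have := (ord_nodup nums).getElem_inj_iff.mp h; omega
      have := mem_cands nums (i := (pvOrd nums).getD k 0)
        (j := (pvOrd nums)[k-1]) (ord_val_lt nums (by omega)) (by rw [hgk]; exact hne)
      rw [show |nums.getD ((pvOrd nums).getD k 0) 0 - nums.getD (pvOrd nums)[k-1] 0| = L by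
        rw [hLdef, hgk, hg1, abs_of_nonneg (by omega)]] at this
      exact this
    symm
    rw [List.min?_eq_some_iff]
    exact ⟨hLmem, cands_lower nums k hkord _ (fun _ => le_refl _) (fun h => absurd h h1)⟩
  · -- k = 0, only right neighbour
    have hg2 : (pvOrd nums).getD (k+1) 0 = (pvOrd nums)[k+1] :=
      List.getD_eq_getElem _ _ (by rw [ord_length]; omega)
    simp only [pvBest, if_neg h0, if_pos h1]
    set R := nums.getD ((pvOrd nums).getD (k+1) 0) 0 - nums.getD ((pvOrd nums).getD k 0) 0 with hRdef
    have hRnn : nums.getD (pvOrd nums)[k] 0 ≤ nums.getD (pvOrd nums)[k+1] 0 :=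
      ord_mono nums (by omega) (by rw [ord_length]; omega)
    have hRmem : R ∈ pvCands nums ((pvOrd nums).getD k 0) := by
      have hne : (pvOrd nums)[k+1] ≠ (pvOrd nums)[k] := by
        intro h; have := (ord_nodup nums).getElem_inj_iff.mp h; omega
      have := mem_cands nums (i := (pvOrd nums).getD k 0)
        (j := (pvOrd nums)[k+1]) (ord_val_lt nums (by rw [ord_length]; omega)) (by rw [hgk]; exact hne)
      rw [show |nums.getD ((pvOrd nums).getD k 0) 0 - nums.getD (pvOrd nums)[k+1] 0| = R by
        rw [hRdef, hgk, hg2, abs_of_nonpos (by omega)]; ring] at this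
      exact this
    symm
    rw [List.min?_eq_some_iff]
    exact ⟨hRmem, cands_lower nums k hkord _ (fun h => absurd h h0) (fun _ => le_refl _)⟩
  · omega

theorem main_equiv (nums : List Int) (hpre : nums.length ≠ 1) :
    min_manhattan_distance nums = min_manhattan_distance_alt nums := by
  rw [a_char, alt_unfold]
  apply List.ext_getElem
  · simp [foldl_step_length]
  · intro idx h1 h2
    have hn : idx < nums.length := by simpa using h1
    have h2' : 2 ≤ nums.length := by omega
    have hidx_mem : idx ∈ pvOrd nums :=
      (PySem.List.sorted_perm (List.range nums.length)
        (fun i => nums.getD i 0) false).mem_iff.mpr (by simpa using hn)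
    obtain ⟨k, hk, hordk⟩ := List.mem_iff_getElem.mp hidx_mem
    have hkn : k < nums.length := by rw [← ord_length nums]; exact hk
    have hres : ∀ j ∈ pvOrd nums, j < (List.replicate nums.length (none : Option Int)).length := by
      intro j hj
      have := (PySem.List.sorted_perm (List.range nums.length)
        (fun i => nums.getD i 0) false).mem_iff.mp hj
      simpa using this
    have hget := fold_range_get nums (pvOrd nums) (ord_nodup nums) nums.length k hkn
      (by rw [ord_length]) _ hres
    have hgd : (pvOrd nums).getD k 0 = idx := by rw [List.getD_eq_getElem _ _ hk, hordk]
    rw [hgd] at hget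
    rw [List.getElem_map, List.getElem_map, List.getElem_range]
    have hidxlt : idx < ((List.range nums.length).foldl (pvStep nums (pvOrd nums))
        (List.replicate nums.length (none : Option Int))).length := by
      rw [foldl_step_length]; simpa using hn
    have hfold : ((List.range nums.length).foldl (pvStep nums (pvOrd nums))
        (List.replicate nums.length (none : Option Int)))[idx] = pvBest nums (pvOrd nums) k :=
      Option.some.inj (by rw [← List.getElem?_eq_getElem hidxlt, hget])
    rw [hfold, pvBest_eq nums h2' k hkn, hgd]

-- ===== VERDICT (by name: the statement is the Claim_ definition above) =====
theorem min_manhattan_distance_spec : Claim_equal_min_manhattan_distance := by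
  intro nums _ hpre
  unfold Spec_min_manhattan_distance
  exact main_equiv nums hpre
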